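-- pv_equiv track=rewrite | github.com/luizmelo001/Launch-School-Backend-Exercises | PY110_PY119_Small_Problems/interview_prep/17_problem.py | word_count_by_case
-- ===== SOURCE A (Python) =====
-- def word_count_by_case(text):
--     words_lst = text.replace(".", "").split()
--     uppercase = 0
--     lowercase = 0
--     mixed_case = 0
--
--     for word in words_lst:
--         if all([letter.isupper() for letter in word]):
--             uppercase += 1
--         elif all([letter.islower() for letter in word]):
--             lowercase += 1
--         else:
--             mixed_case += 1
--
--     return {'uppercase': uppercase, 'lowercase': lowercase, 'mixed_case': mixed_case}
-- ===== SOURCE B (Python) =====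
-- def word_count_by_case(text):
--     words = text.replace(".", "").split()
--     uppercase = sum(1 for w in words if all(c.isupper() for c in w))
--     lowercase = sum(1 for w in words if all(c.islower() for c in w))
--     mixed_case = len(words) - uppercase - lowercase
--     return {'uppercase': uppercase, 'lowercase': lowercase, 'mixed_case': mixed_case}
-- ===== Notes on version B (the rewrite author's own statement) =====
-- stated objective: alternative
-- what changed: Replaces the single three-way classifying loop with counters by two independent counting passes (all-upper and all-lower) and derives mixed_case by subtraction from the word count, sound because no non-empty word is both all-upper and all-lower.
import Mathlib
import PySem

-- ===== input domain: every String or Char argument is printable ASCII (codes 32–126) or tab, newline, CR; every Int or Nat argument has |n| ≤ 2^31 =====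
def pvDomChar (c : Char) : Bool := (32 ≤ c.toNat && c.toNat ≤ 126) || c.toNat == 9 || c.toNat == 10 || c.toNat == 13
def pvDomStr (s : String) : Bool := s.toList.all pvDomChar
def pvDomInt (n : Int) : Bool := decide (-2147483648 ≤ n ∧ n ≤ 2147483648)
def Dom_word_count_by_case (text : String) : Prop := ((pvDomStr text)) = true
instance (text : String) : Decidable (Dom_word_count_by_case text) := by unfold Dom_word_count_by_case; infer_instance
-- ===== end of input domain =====

-- B counts all-upper and all-lower words in two passes and derives mixed_case by subtraction,
-- instead of A's single three-way classifying loop (alternative decomposition, same cost).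


-- ===== PORT A =====
def word_count_by_case (text : String) : List (String × Int) :=
  let words_lst := PySem.Str.split₀ (PySem.Str.replace text "." "")
  let st := words_lst.foldl (fun (st : Int × Int × Int) word =>
    if (word.toList.map (fun letter => PySem.Chars.isupper letter)).all (· = true) then
      (st.1 + 1, st.2.1, st.2.2)
    else if (word.toList.map (fun letter => PySem.Chars.islower letter)).all (· = true) then
      (st.1, st.2.1 + 1, st.2.2)
    else
      (st.1, st.2.1, st.2.2 + 1)) (0, 0, 0)
  [("uppercase", st.1), ("lowercase", st.2.1), ("mixed_case", st.2.2)]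

-- ===== PORT B =====
def word_count_by_case_alt (text : String) : List (String × Int) :=
  let words := PySem.Str.split₀ (PySem.Str.replace text "." "")
  let uppercase : Int := words.countP (fun w => w.toList.all (fun c => PySem.Chars.isupper c))
  let lowercase : Int := words.countP (fun w => w.toList.all (fun c => PySem.Chars.islower c))
  let mixed_case : Int := (words.length : Int) - uppercase - lowercase
  [("uppercase", uppercase), ("lowercase", lowercase), ("mixed_case", mixed_case)]

-- ===== PRECONDITION & SPEC =====
def Spec_word_count_by_case (text : String) (out : List (String × Int)) : Prop := out = word_count_by_case_alt text
instance (text : String) (out : List (String × Int)) : Decidable (Spec_word_count_by_case text out) := by unfold Spec_word_count_by_case; infer_instance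

-- ===== CLAIM (what is proved, stated in full; the proofs are below) =====
def Claim_equal_word_count_by_case : Prop := ∀ (text : String), Dom_word_count_by_case text → Spec_word_count_by_case text (word_count_by_case text)

-- ===== LEMMAS AND PROOFS =====

-- every piece produced by split₀.go is nonempty, provided acc's pieces are
theorem split0_go_ne_nil (s cur acc) (hacc : ∀ w ∈ acc, w ≠ ([] : List Char)) :
    ∀ w ∈ PySem.Chars.split₀.go s cur acc, w ≠ [] := by
  induction s generalizing cur acc with
  | nil =>
    intro w hw
    unfold PySem.Chars.split₀.go at hw
    by_cases hcur : cur.isEmpty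
    · rw [if_pos hcur] at hw; exact hacc w (List.mem_reverse.mp hw)
    · rw [if_neg hcur] at hw
      rcases List.mem_cons.mp (List.mem_reverse.mp hw) with h | h
      · subst h; simpa using (by simpa [List.isEmpty_iff] using hcur : cur ≠ [])
      · exact hacc w h
  | cons c rest ih =>
    intro w hw
    unfold PySem.Chars.split₀.go at hw
    by_cases hsp : PySem.Chars.isspace c
    · rw [if_pos hsp] at hw
      by_cases hcur : cur.isEmpty
      · rw [if_pos hcur] at hw; exact ih [] acc hacc w hw
      · rw [if_neg hcur] at hw
        refine ih [] (cur.reverse :: acc) ?_ w hw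
        intro v hv
        rcases List.mem_cons.mp hv with h | h
        · subst h; simpa using (by simpa [List.isEmpty_iff] using hcur : cur ≠ [])
        · exact hacc v h
    · rw [if_neg hsp] at hw; exact ih (c :: cur) acc hacc w hw

theorem split0_ne_nil (s : List Char) : ∀ w ∈ PySem.Chars.split₀ s, w ≠ [] := by
  intro w hw
  exact split0_go_ne_nil s [] [] (by simp) w hw

-- no character is both upper and lower
theorem not_upper_and_lower (c : Char) : ¬ (PySem.Chars.isupper c = true ∧ PySem.Chars.islower c = true) := by
  simp only [PySem.Chars.isupper, PySem.Chars.islower]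
  rintro ⟨h1, h2⟩
  simp only [Bool.and_eq_true, decide_eq_true_eq] at h1 h2
  have : ('a' : Char) ≤ 'Z' := le_trans h2.1 h1.2
  exact absurd this (by decide)

-- the two word-level predicates never hold together on a nonempty word
theorem word_not_both (w : List Char) (hne : w ≠ []) :
    ¬ (w.all (fun c => PySem.Chars.isupper c) = true ∧ w.all (fun c => PySem.Chars.islower c) = true) := by
  rintro ⟨h1, h2⟩
  obtain ⟨c, hc⟩ := List.exists_mem_of_ne_nil w hne
  exact not_upper_and_lower c ⟨List.all_eq_true.mp h1 c hc, List.all_eq_true.mp h2 c hc⟩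

-- A's three-counter fold, characterised by B's counts, for words where the predicates are exclusive
theorem fold_eq_counts (P Q : String → Bool)
    (ws : List String) (hex : ∀ w ∈ ws, ¬ (P w = true ∧ Q w = true)) (u l m : Int) :
    ws.foldl (fun (st : Int × Int × Int) word =>
      if P word then (st.1 + 1, st.2.1, st.2.2)
      else if Q word then (st.1, st.2.1 + 1, st.2.2)
      else (st.1, st.2.1, st.2.2 + 1)) (u, l, m)
    = (u + ws.countP P, l + ws.countP Q,
       m + ((ws.length : Int) - ws.countP P - ws.countP Q)) := by
  induction ws generalizing u l m with
  | nil => simp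
  | cons w rest ih =>
    have hw := hex w (List.mem_cons_self)
    have hrest : ∀ v ∈ rest, ¬ (P v = true ∧ Q v = true) :=
      fun v hv => hex v (List.mem_cons_of_mem _ hv)
    simp only [List.foldl_cons, List.countP_cons, List.length_cons]
    by_cases hP : P w = true
    · have hQ : Q w = false := by
        cases hq : Q w
        · rfl
        · exact absurd ⟨hP, hq⟩ hw
      rw [if_pos hP, ih hrest]
      simp only [hP, hQ, if_true, if_false, Bool.false_eq_true, Prod.mk.injEq]
      refine ⟨?_, ?_, ?_⟩ <;> push_cast <;> ring
    · rw [if_neg hP]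
      by_cases hQ : Q w = true
      · rw [if_pos hQ, ih hrest]
        simp only [hP, hQ, if_true, if_false, Bool.false_eq_true, Prod.mk.injEq]
        refine ⟨?_, ?_, ?_⟩ <;> push_cast <;> ring
      · rw [if_neg hQ, ih hrest]
        simp only [Prod.mk.injEq]
        rw [if_neg hP, if_neg hQ]
        refine ⟨?_, ?_, ?_⟩ <;> push_cast <;> ring

-- a mapped all-true test is the direct all test
theorem all_map_eq (l : List Char) (f : Char → Bool) : (l.map f).all (· = true) = l.all f := by
  simp [Function.comp_def]

-- ===== VERDICT (by name: the statement is the Claim_ definition above) =====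
theorem word_count_by_case_spec : Claim_equal_word_count_by_case := by
  intro text _
  unfold Spec_word_count_by_case word_count_by_case word_count_by_case_alt
  simp only [all_map_eq]
  set ws := PySem.Str.split₀ (PySem.Str.replace text "." "") with hws
  have hne : ∀ w ∈ ws, w.toList ≠ [] := by
    intro w hw
    rw [hws, PySem.Str.split₀] at hw
    obtain ⟨v, hv, rfl⟩ := List.mem_map.mp hw
    simpa using split0_ne_nil _ v hv
  have hex : ∀ w ∈ ws, ¬ ((w.toList.all fun c => PySem.Chars.isupper c) = true ∧
      (w.toList.all fun c => PySem.Chars.islower c) = true) :=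
    fun w hw => word_not_both w.toList (hne w hw)
  have key := fold_eq_counts (fun w => w.toList.all fun c => PySem.Chars.isupper c)
    (fun w => w.toList.all fun c => PySem.Chars.islower c) ws hex 0 0 0
  simp only [zero_add] at key
  rw [key]
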